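-- pv_equiv track=rewrite | github.com/morad04/mintbot-insights | src/engine/tempo_scanner.py | _group_by_contract
-- ===== SOURCE A (Python) =====
-- from typing import Dict, List, Optional
--
-- def _group_by_contract(logs: List[Dict], latest_block: int) -> Dict:
--     """Group mint logs by contract address."""
--     contracts = {}
--     for log in logs:
--         addr = log.get("address", "").lower()
--         block_num = int(log.get("blockNumber", "0x0"), 16)
--         if addr not in contracts:
--             contracts[addr] = {
--                 "count": 0,
--                 "first_block": block_num,
--                 "last_block": block_num,
--             }
--         contracts[addr]["count"] += 1
--         contracts[addr]["first_block"] = min(contracts[addr]["first_block"], block_num)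
--         contracts[addr]["last_block"] = max(contracts[addr]["last_block"], block_num)
--     return contracts
-- ===== SOURCE B (Python) =====
-- def _group_by_contract(logs, latest_block):
--     """Group mint logs by contract address: bucket block numbers per address, then summarize."""
--     pairs = [(log.get("address", "").lower(), int(log.get("blockNumber", "0x0"), 16))
--              for log in logs]
--     buckets = {}
--     for addr, block_num in pairs:
--         buckets[addr] = buckets.get(addr, []) + [block_num]
--     return {
--         addr: {"count": len(blocks), "first_block": min(blocks), "last_block": max(blocks)}
--         for addr, blocks in buckets.items()
--     }
-- ===== Notes on version B (the rewrite author's own statement) =====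
-- stated objective: alternative
-- what changed: B replaces A's incremental per-log dict-of-stats mutation with two passes: bucket all block numbers per lowercased address first, then build each summary once from len/min/max of the bucket.
import Mathlib
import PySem

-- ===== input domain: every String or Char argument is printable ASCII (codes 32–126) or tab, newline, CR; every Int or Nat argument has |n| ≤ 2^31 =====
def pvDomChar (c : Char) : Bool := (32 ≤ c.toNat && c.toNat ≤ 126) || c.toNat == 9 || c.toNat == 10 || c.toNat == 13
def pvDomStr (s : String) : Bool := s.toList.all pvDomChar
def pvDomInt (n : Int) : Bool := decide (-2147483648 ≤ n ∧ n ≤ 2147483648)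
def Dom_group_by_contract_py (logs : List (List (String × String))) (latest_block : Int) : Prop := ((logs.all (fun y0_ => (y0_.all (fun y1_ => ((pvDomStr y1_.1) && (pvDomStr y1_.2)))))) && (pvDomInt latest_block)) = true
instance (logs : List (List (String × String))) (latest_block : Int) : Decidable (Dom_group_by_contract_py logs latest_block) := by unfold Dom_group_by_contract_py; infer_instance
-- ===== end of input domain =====

-- B groups block numbers into per-address buckets first and summarizes each bucket once,
-- instead of A's per-log mutation of a nested stats dict; same cost, different decomposition.

-- ===== PORT A =====
-- one loop iteration of A (Python raises ValueError on an unparsable blockNumber; Pre_ excludes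
-- those inputs, the port uses .getD 0 there)
def pvStepA (contracts : PySem.Dict String (PySem.Dict String Int))
    (log : List (String × String)) : PySem.Dict String (PySem.Dict String Int) :=
  let addr := PySem.Str.lower ((PySem.Dict.mk log).getD "address" "")
  let block_num := (PySem.Int.ofStrBase? ((PySem.Dict.mk log).getD "blockNumber" "0x0") 16).getD 0
  let c1 := if contracts.contains addr then contracts else
    contracts.insert addr (PySem.Dict.ofList [("count", 0), ("first_block", block_num), ("last_block", block_num)])
  let c2 := c1.modify addr PySem.Dict.empty (fun d => d.insert "count" (d.getD "count" 0 + 1))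
  let c3 := c2.modify addr PySem.Dict.empty (fun d => d.insert "first_block" (min (d.getD "first_block" 0) block_num))
  c3.modify addr PySem.Dict.empty (fun d => d.insert "last_block" (max (d.getD "last_block" 0) block_num))

def group_by_contract_py (logs : List (List (String × String))) (latest_block : Int) : List (String × List (String × Int)) :=
  ((logs.foldl pvStepA PySem.Dict.empty).items).map (fun p => (p.1, p.2.items))

-- ===== PORT B =====
def pvParse (log : List (String × String)) : String × Int :=
  (PySem.Str.lower ((PySem.Dict.mk log).getD "address" ""),
   (PySem.Int.ofStrBase? ((PySem.Dict.mk log).getD "blockNumber" "0x0") 16).getD 0)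

def group_by_contract_py_alt (logs : List (List (String × String))) (latest_block : Int) : List (String × List (String × Int)) :=
  let pairs := logs.map pvParse
  let buckets := pairs.foldl (fun d p => d.modify p.1 [] (fun bs => bs ++ [p.2])) PySem.Dict.empty
  buckets.items.map (fun p =>
    (p.1, [("count", (p.2.length : Int)),
           ("first_block", (PySem.List.min? p.2 (fun x => x)).getD 0),
           ("last_block", (PySem.List.max? p.2 (fun x => x)).getD 0)]))

-- ===== PRECONDITION & SPEC =====
-- A raises ValueError when some log's blockNumber value is not a valid base-16 integer literal; Pre_ excludes exactly those inputs (B raises there too).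
def Pre_group_by_contract_py (logs : List (List (String × String))) (latest_block : Int) : Prop :=
  ∀ log ∈ logs, (PySem.Int.ofStrBase? ((PySem.Dict.mk log).getD "blockNumber" "0x0") 16).isSome
instance (logs : List (List (String × String))) (latest_block : Int) : Decidable (Pre_group_by_contract_py logs latest_block) := by unfold Pre_group_by_contract_py; infer_instance
def pvWitness_group_by_contract_py : (List (List (String × String))) × Int :=
  ([[("address", "0xAb"), ("blockNumber", "0x1A")], [("address", "0xab"), ("blockNumber", "0x3")]], 0)

def Spec_group_by_contract_py (logs : List (List (String × String))) (latest_block : Int) (out : List (String × List (String × Int))) : Prop := out = group_by_contract_py_alt logs latest_block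
instance (logs : List (List (String × String))) (latest_block : Int) (out : List (String × List (String × Int))) : Decidable (Spec_group_by_contract_py logs latest_block out) := by unfold Spec_group_by_contract_py; infer_instance

-- ===== CLAIM (what is proved, stated in full; the proofs are below) =====
def Claim_equal_group_by_contract_py : Prop := ∀ (logs : List (List (String × String))) (latest_block : Int), Dom_group_by_contract_py logs latest_block → Pre_group_by_contract_py logs latest_block → Spec_group_by_contract_py logs latest_block (group_by_contract_py logs latest_block)

-- ===== LEMMAS AND PROOFS =====

-- the summary dict A maintains for an address whose (nonempty) bucket is bs
def pvSumm (bs : List Int) : PySem.Dict String Int :=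
  PySem.Dict.mk [("count", (bs.length : Int)),
                 ("first_block", (PySem.List.min? bs (fun x => x)).getD 0),
                 ("last_block", (PySem.List.max? bs (fun x => x)).getD 0)]

def pvStepB (d : PySem.Dict String (List Int)) (p : String × Int) : PySem.Dict String (List Int) :=
  d.modify p.1 [] (fun bs => bs ++ [p.2])

def pvInv (C : PySem.Dict String (PySem.Dict String Int)) (Bk : PySem.Dict String (List Int)) : Prop :=
  C.keys = Bk.keys ∧ Bk.keys.Nodup ∧
  ∀ a ∈ Bk.keys, Bk.getD a [] ≠ [] ∧ C.getD a PySem.Dict.empty = pvSumm (Bk.getD a [])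

theorem pvStepA_def (C : PySem.Dict String (PySem.Dict String Int)) (log : List (String × String)) :
    pvStepA C log =
    ((((if C.contains (pvParse log).1 then C else
        C.insert (pvParse log).1 (PySem.Dict.ofList
          [("count", 0), ("first_block", (pvParse log).2), ("last_block", (pvParse log).2)])).modify
        (pvParse log).1 PySem.Dict.empty (fun d => d.insert "count" (d.getD "count" 0 + 1))).modify
        (pvParse log).1 PySem.Dict.empty (fun d => d.insert "first_block" (min (d.getD "first_block" 0) (pvParse log).2))).modify
        (pvParse log).1 PySem.Dict.empty (fun d => d.insert "last_block" (max (d.getD "last_block" 0) (pvParse log).2))) := rfl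

theorem pvKeys_modify {ν : Type} (d : PySem.Dict String ν) (k : String) (d0 : ν) (f : ν → ν) :
    (d.modify k d0 f).keys = if d.contains k then d.keys else d.keys ++ [k] := by
  rw [PySem.Dict.keys_modify]
  by_cases h : d.contains k
  · rw [if_pos h, PySem.Dict.keys_insert_of_contains d _ h]
  · rw [if_neg h, PySem.Dict.keys_insert_of_not_contains d _ (by simpa using h)]

theorem pvMin0_append (bs : List Int) (b : Int) (hbs : bs ≠ []) :
    (PySem.List.min? (bs ++ [b]) (fun x => x)).getD 0
      = min ((PySem.List.min? bs (fun x => x)).getD 0) b := by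
  obtain ⟨h, t, rfl⟩ := List.exists_cons_of_ne_nil hbs
  simp [PySem.List.min?_id_cons, List.foldl_append]

theorem pvMax0_append (bs : List Int) (b : Int) (hbs : bs ≠ []) :
    (PySem.List.max? (bs ++ [b]) (fun x => x)).getD 0
      = max ((PySem.List.max? bs (fun x => x)).getD 0) b := by
  obtain ⟨h, t, rfl⟩ := List.exists_cons_of_ne_nil hbs
  simp [PySem.List.max?_id_cons, List.foldl_append]

-- A's three in-place updates of an existing summary equal the summary of the grown bucket
theorem pvSumm_append (bs : List Int) (b : Int) (hbs : bs ≠ []) :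
    (let S := pvSumm bs
     let d1 := S.insert "count" (S.getD "count" 0 + 1)
     let d2 := d1.insert "first_block" (min (d1.getD "first_block" 0) b)
     d2.insert "last_block" (max (d2.getD "last_block" 0) b))
    = pvSumm (bs ++ [b]) := by
  show PySem.Dict.mk [("count", (bs.length : Int) + 1),
        ("first_block", min ((PySem.List.min? bs (fun x => x)).getD 0) b),
        ("last_block", max ((PySem.List.max? bs (fun x => x)).getD 0) b)] = _
  simp [pvSumm, pvMin0_append bs b hbs, pvMax0_append bs b hbs]

-- A's fresh-key initialisation plus first round of updates equals the summary of [b]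
theorem pvSumm_single (b : Int) :
    (let S := PySem.Dict.ofList ([("count", 0), ("first_block", b), ("last_block", b)] : List (String × Int))
     let d1 := S.insert "count" (S.getD "count" 0 + 1)
     let d2 := d1.insert "first_block" (min (d1.getD "first_block" 0) b)
     d2.insert "last_block" (max (d2.getD "last_block" 0) b))
    = pvSumm [b] := by
  show PySem.Dict.mk [("count", (0 : Int) + 1), ("first_block", min b b), ("last_block", max b b)] = _
  simp [pvSumm]
  exact ⟨rfl, rfl⟩

theorem pvInv_step (C : PySem.Dict String (PySem.Dict String Int)) (Bk : PySem.Dict String (List Int))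
    (log : List (String × String)) (h : pvInv C Bk) :
    pvInv (pvStepA C log) (pvStepB Bk (pvParse log)) := by
  obtain ⟨hkeys, hnd, hval⟩ := h
  rw [pvStepA_def]
  set a := (pvParse log).1 with ha
  set b := (pvParse log).2 with hb
  show pvInv _ (Bk.modify a [] (fun bs => bs ++ [b]))
  by_cases hc : C.contains a
  · -- existing address
    have haK : a ∈ Bk.keys := hkeys ▸ (PySem.Dict.contains_iff_mem_keys C a).mp hc
    have hBc : Bk.contains a = true := (PySem.Dict.contains_iff_mem_keys Bk a).mpr haK
    rw [if_pos hc]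
    have hc1 : (C.modify a PySem.Dict.empty (fun d => d.insert "count" (d.getD "count" 0 + 1))).contains a = true := by
      rw [PySem.Dict.contains_modify]; simp
    have hc2 : ((C.modify a PySem.Dict.empty (fun d => d.insert "count" (d.getD "count" 0 + 1))).modify a PySem.Dict.empty
        (fun d => d.insert "first_block" (min (d.getD "first_block" 0) b))).contains a = true := by
      rw [PySem.Dict.contains_modify]; simp
    refine ⟨?_, ?_, ?_⟩
    · rw [pvKeys_modify, pvKeys_modify, pvKeys_modify, pvKeys_modify,
          if_pos hc2, if_pos hc1, if_pos hc, if_pos hBc, hkeys]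
    · rw [pvKeys_modify, if_pos hBc]; exact hnd
    · intro a' ha'
      have ha'K : a' ∈ Bk.keys := by
        rw [pvKeys_modify, if_pos hBc] at ha'; exact ha'
      obtain ⟨hne0, heq0⟩ := hval a' ha'K
      by_cases hEq : a' = a
      · subst hEq
        constructor
        · rw [PySem.Dict.getD_modify_self]; simp
        · rw [PySem.Dict.getD_modify_self, PySem.Dict.getD_modify_self,
              PySem.Dict.getD_modify_self, PySem.Dict.getD_modify_self, heq0]
          exact pvSumm_append _ b hne0
      · constructor
        · rw [PySem.Dict.getD_modify_of_ne _ _ _ hEq]; exact hne0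
        · rw [PySem.Dict.getD_modify_of_ne _ _ _ hEq, PySem.Dict.getD_modify_of_ne _ _ _ hEq,
              PySem.Dict.getD_modify_of_ne _ _ _ hEq, PySem.Dict.getD_modify_of_ne _ _ _ hEq]
          exact heq0
  · -- fresh address
    have haK : a ∉ Bk.keys := by
      rw [← hkeys]; intro hmem
      exact hc ((PySem.Dict.contains_iff_mem_keys C a).mpr hmem)
    have hBc : Bk.contains a = false := by
      rcases hb' : Bk.contains a with _ | _
      · rfl
      · exact absurd ((PySem.Dict.contains_iff_mem_keys Bk a).mp hb') haK
    rw [if_neg hc]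
    set C1 := C.insert a (PySem.Dict.ofList [("count", 0), ("first_block", b), ("last_block", b)]) with hC1
    have hc1 : C1.contains a = true := by
      rw [hC1, PySem.Dict.contains_insert]; simp
    have hm1 : (C1.modify a PySem.Dict.empty (fun d => d.insert "count" (d.getD "count" 0 + 1))).contains a = true := by
      rw [PySem.Dict.contains_modify]; simp
    have hm2 : ((C1.modify a PySem.Dict.empty (fun d => d.insert "count" (d.getD "count" 0 + 1))).modify a PySem.Dict.empty
        (fun d => d.insert "first_block" (min (d.getD "first_block" 0) b))).contains a = true := by
      rw [PySem.Dict.contains_modify]; simp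
    refine ⟨?_, ?_, ?_⟩
    · rw [pvKeys_modify, pvKeys_modify, pvKeys_modify, pvKeys_modify,
          if_pos hm2, if_pos hm1, if_pos hc1, if_neg (by simp [hBc]),
          hC1, PySem.Dict.keys_insert_of_not_contains C _ (by simpa using hc), hkeys]
    · rw [pvKeys_modify, if_neg (by simp [hBc])]
      exact List.Nodup.append hnd (List.nodup_singleton a) (by simpa using haK)
    · intro a' ha'
      rw [pvKeys_modify, if_neg (by simp [hBc]), List.mem_append, List.mem_singleton] at ha'
      by_cases hEq : a' = a
      · subst hEq
        have hBgetD : Bk.getD a [] = [] := PySem.Dict.getD_of_not_contains Bk [] hBc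
        constructor
        · rw [PySem.Dict.getD_modify_self, hBgetD]; simp
        · rw [PySem.Dict.getD_modify_self, PySem.Dict.getD_modify_self,
              PySem.Dict.getD_modify_self, PySem.Dict.getD_modify_self, hBgetD]
          have hCget : C1.getD a PySem.Dict.empty
              = PySem.Dict.ofList [("count", 0), ("first_block", b), ("last_block", b)] := by
            rw [hC1, PySem.Dict.getD_insert]; simp
          rw [hCget]
          exact pvSumm_single b
      · have ha'K : a' ∈ Bk.keys := by
          rcases ha' with h1 | h1
          · exact h1
          · exact absurd h1 hEq
        obtain ⟨hne0, heq0⟩ := hval a' ha'K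
        constructor
        · rw [PySem.Dict.getD_modify_of_ne _ _ _ hEq]; exact hne0
        · rw [PySem.Dict.getD_modify_of_ne _ _ _ hEq, PySem.Dict.getD_modify_of_ne _ _ _ hEq,
              PySem.Dict.getD_modify_of_ne _ _ _ hEq,
              PySem.Dict.getD_modify_of_ne _ _ _ hEq, hC1,
              PySem.Dict.getD_insert]
          rw [if_neg hEq]
          exact heq0

theorem pvInv_fold (logs : List (List (String × String)))
    (C : PySem.Dict String (PySem.Dict String Int)) (Bk : PySem.Dict String (List Int))
    (h : pvInv C Bk) :
    pvInv (logs.foldl pvStepA C) (logs.foldl (fun d log => pvStepB d (pvParse log)) Bk) := by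
  induction logs generalizing C Bk with
  | nil => exact h
  | cons log rest ih => exact ih _ _ (pvInv_step C Bk log h)

theorem group_by_contract_py_spec : Claim_equal_group_by_contract_py := by
  intro logs latest_block _ _
  show group_by_contract_py logs latest_block = group_by_contract_py_alt logs latest_block
  show List.map (fun p => (p.1, p.2.items)) (List.foldl pvStepA PySem.Dict.empty logs).items
     = List.map (fun p => (p.1, [("count", (p.2.length : Int)),
         ("first_block", (PySem.List.min? p.2 (fun x => x)).getD 0),
         ("last_block", (PySem.List.max? p.2 (fun x => x)).getD 0)]))
       (List.foldl (fun (d : PySem.Dict String (List Int)) p => d.modify p.1 [] (fun bs => bs ++ [p.2]))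
         PySem.Dict.empty (List.map pvParse logs)).items
  have hfold : List.foldl (fun (d : PySem.Dict String (List Int)) p => d.modify p.1 [] (fun bs => bs ++ [p.2]))
        PySem.Dict.empty (List.map pvParse logs)
      = List.foldl (fun d log => pvStepB d (pvParse log)) PySem.Dict.empty logs := by
    rw [List.foldl_map]; rfl
  rw [hfold]
  obtain ⟨hkeys, hnd, hval⟩ := pvInv_fold logs PySem.Dict.empty PySem.Dict.empty
    ⟨rfl, PySem.Dict.nodup_keys_empty, by intro a ha; simp at ha⟩
  rw [PySem.Dict.items_eq_map_keys _ (hkeys ▸ hnd) PySem.Dict.empty,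
      PySem.Dict.items_eq_map_keys _ hnd []]
  rw [List.map_map, List.map_map, hkeys]
  apply List.map_congr_left
  intro k hk
  obtain ⟨hne0, heq0⟩ := hval k hk
  simp only [Function.comp]
  rw [heq0]
  rfl
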